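-- pv_equiv track=rewrite | github.com/Hwclub1105/Karaca-s-Encryption-algorithm | main.py | karaca_encrypt
-- ===== SOURCE A (Python) =====
-- def karaca_encrypt(msg):
--     msg = msg[::-1]
--     vowel = ['a', 'e', 'i', 'o', 'u']
--     replacement = ['0', '1', '2', '3', '4']
--     for i in range(5):
--         msg = msg.replace(vowel[i],replacement[i])
--     msg += 'aca'
--     return msg
-- ===== SOURCE B (Python) =====
-- def karaca_encrypt(msg):
--     msg = msg[::-1]
--     table = {'a': '0', 'e': '1', 'i': '2', 'o': '3', 'u': '4'}
--     return ''.join(table.get(c, c) for c in msg) + 'aca'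
-- ===== Notes on version B (the rewrite author's own statement) =====
-- stated objective: idiomatic
-- what changed: Replaced the five sequential whole-string str.replace passes by a single pass over the reversed string with a vowel->digit lookup table joined at once.
import Mathlib
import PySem

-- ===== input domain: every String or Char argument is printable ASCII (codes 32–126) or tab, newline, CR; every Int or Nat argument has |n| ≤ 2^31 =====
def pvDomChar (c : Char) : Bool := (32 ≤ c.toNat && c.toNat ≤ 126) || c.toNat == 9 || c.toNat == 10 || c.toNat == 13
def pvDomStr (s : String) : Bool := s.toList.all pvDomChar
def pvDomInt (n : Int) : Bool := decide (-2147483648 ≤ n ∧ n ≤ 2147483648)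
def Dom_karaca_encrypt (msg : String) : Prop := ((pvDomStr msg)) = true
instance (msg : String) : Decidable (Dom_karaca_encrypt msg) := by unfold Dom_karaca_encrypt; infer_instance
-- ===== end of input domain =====

-- B replaces A's five whole-string replace passes by one table-driven pass (dict lookup per char); same return value, no speed claim.

-- ===== PORT A =====
-- A: msg = msg[::-1]; then for i in range(5): msg = msg.replace(vowel[i], replacement[i]); msg += 'aca'
def karaca_encrypt (msg : String) : String :=
  let m0 : List Char := (PySem.Chars.slice? msg.toList none none (-1)).getD []
  let vowel : List (List Char) := [['a'], ['e'], ['i'], ['o'], ['u']]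
  let replacement : List (List Char) := [['0'], ['1'], ['2'], ['3'], ['4']]
  let m1 := (PySem.List.pyRange 0 5 1).foldl
    (fun m i => PySem.Chars.replace m ((PySem.List.pyGet? vowel i).getD [])
                                     ((PySem.List.pyGet? replacement i).getD [])) m0
  String.ofList (m1 ++ "aca".toList)

-- ===== PORT B =====
-- B: msg = msg[::-1]; table = {...}; ''.join(table.get(c, c) for c in msg) + 'aca'
def karaca_encrypt_alt (msg : String) : String :=
  let m0 : List Char := (PySem.Chars.slice? msg.toList none none (-1)).getD []
  let table : PySem.Dict Char Char :=
    ((((PySem.Dict.empty.insert 'a' '0').insert 'e' '1').insert 'i' '2').insert 'o' '3').insert 'u' '4'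
  String.ofList ((m0.map (fun c => table.getD c c)) ++ "aca".toList)

-- ===== PRECONDITION & SPEC =====
def Spec_karaca_encrypt (msg : String) (out : String) : Prop := out = karaca_encrypt_alt msg
instance (msg : String) (out : String) : Decidable (Spec_karaca_encrypt msg out) := by unfold Spec_karaca_encrypt; infer_instance

-- ===== CLAIM (what is proved, stated in full; the proofs are below) =====
def Claim_equal_karaca_encrypt : Prop := ∀ (msg : String), Dom_karaca_encrypt msg → Spec_karaca_encrypt msg (karaca_encrypt msg)

-- ===== LEMMAS AND PROOFS =====

-- replace with a single-char pattern is a per-character map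
theorem replace_go_single (a b : Char) :
    ∀ (fuel : Nat) (l acc : List Char), l.length ≤ fuel →
      PySem.Chars.replace.go [a] [b] fuel l acc
        = acc.reverse ++ l.map (fun c => if c = a then b else c) := by
  intro fuel
  induction fuel with
  | zero =>
    intro l acc h
    have : l = [] := List.eq_nil_of_length_eq_zero (Nat.le_zero.mp h)
    subst this; simp [PySem.Chars.replace.go]
  | succ n ih =>
    intro l acc h
    cases l with
    | nil => simp [PySem.Chars.replace.go]
    | cons c t =>
      simp only [PySem.Chars.replace.go]
      by_cases hc : c = a
      · subst hc
        have hp : [c].isPrefixOf (c :: t) = true := by simp [List.isPrefixOf]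
        simp only [hp, if_true]
        show PySem.Chars.replace.go [c] [b] n t (b :: acc) = _
        rw [ih t (b :: acc) (by simpa using Nat.lt_succ_iff.mp (by simpa using h))]
        simp
      · have hp : [a].isPrefixOf (c :: t) = false := by
          simp [List.isPrefixOf]; exact fun h' => (hc h'.symm).elim
        simp only [hp]
        rw [ih t (c :: acc) (by simpa using Nat.lt_succ_iff.mp (by simpa using h))]
        simp [hc]

theorem replace_single (a b : Char) (l : List Char) :
    PySem.Chars.replace l [a] [b] = l.map (fun c => if c = a then b else c) := by
  simp only [PySem.Chars.replace, List.isEmpty_cons, Bool.false_eq_true, if_false]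
  simpa using replace_go_single a b l.length l [] le_rfl

-- ===== VERDICT (by name: the statement is the Claim_ definition above) =====

set_option maxHeartbeats 1000000 in
theorem table_fun (c : Char) (h1 : c ≠ 'a') (h2 : c ≠ 'e') (h3 : c ≠ 'i') (h4 : c ≠ 'o') (h5 : c ≠ 'u') :
    (((((PySem.Dict.empty.insert 'a' '0').insert 'e' '1').insert 'i' '2').insert 'o' '3').insert 'u' '4').getD c c = c := by
  have b1 : ('a' == c) = false := beq_eq_false_iff_ne.mpr (Ne.symm h1)
  have b2 : ('e' == c) = false := beq_eq_false_iff_ne.mpr (Ne.symm h2)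
  have b3 : ('i' == c) = false := beq_eq_false_iff_ne.mpr (Ne.symm h3)
  have b4 : ('o' == c) = false := beq_eq_false_iff_ne.mpr (Ne.symm h4)
  have b5 : ('u' == c) = false := beq_eq_false_iff_ne.mpr (Ne.symm h5)
  simp [PySem.Dict.getD, PySem.Dict.get?, PySem.Dict.insert, PySem.Dict.empty, List.find?,
    b1, b2, b3, b4, b5]

theorem karaca_encrypt_spec : Claim_equal_karaca_encrypt := by
  intro msg _
  unfold Spec_karaca_encrypt karaca_encrypt karaca_encrypt_alt
  have hrange : PySem.List.pyRange 0 5 1 = [0, 1, 2, 3, 4] := by decide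
  simp only [hrange, List.foldl_cons, List.foldl_nil]
  simp only [PySem.List.pyGet?, PySem.List.pyIdx?]
  norm_num
  simp only [show Int.toNat 2 = 2 from rfl, show Int.toNat 3 = 3 from rfl,
    show Int.toNat 4 = 4 from rfl, List.getElem_cons_succ, List.getElem_cons_zero]
  simp only [replace_single, List.map_map]
  congr 1
  apply List.map_congr_left
  intro c _
  by_cases h1 : c = 'a'
  · subst h1; decide
  by_cases h2 : c = 'e'
  · subst h2; decide
  by_cases h3 : c = 'i'
  · subst h3; decide
  by_cases h4 : c = 'o'
  · subst h4; decide
  by_cases h5 : c = 'u'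
  · subst h5; decide
  simp [h1, h2, h3, h4, h5, table_fun c h1 h2 h3 h4 h5]
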